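-- pv_equiv track=rewrite | github.com/liupengsay/PyIsTheBestLang | src/graph/topological_sort.py | lc_1591
-- ===== SOURCE A (Python) =====
-- from typing import List, Optional
-- from collections import defaultdict, deque
--
-- def lc_1591(grid: List[List[int]]) -> bool:
--     # 模板：经典建图判断拓扑排序是否无环
--     color = defaultdict(list)
--     m, n = len(grid), len(grid[0])
--     for i in range(m):
--         for j in range(n):
--             color[grid[i][j]].append([i, j])
--
--     pos = defaultdict(list)
--     for c in color:
--         lst = color[c]
--         x1 = min(x for x, _ in lst)
--         x2 = max(x for x, _ in lst)
--
--         y1 = min(x for _, x in lst)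
--         y2 = max(x for _, x in lst)
--         pos[c] = [x1, x2, y1, y2]
--
--     degree = defaultdict(int)
--     dct = defaultdict(list)
--     for x in pos:
--         a1, a2, b1, b2 = pos[x]
--         for y in pos:
--             if x != y:
--                 for a, b in color[y]:
--                     if a1 <= a <= a2 and b1 <= b <= b2:
--                         dct[x].append(y)
--                         degree[y] += 1
--     stack = [x for x in pos if not degree[x]]
--     while stack:
--         nex = []
--         for i in stack:
--             for j in dct[i]:
--                 degree[j] -= 1
--                 if not degree[j]:
--                     nex.append(j)
--         stack = nex[:]
--     return all(degree[x] == 0 for x in pos)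
-- ===== SOURCE B (Python) =====
-- from typing import List
--
-- def lc_1591(grid: List[List[int]]) -> bool:
--     # One pass computes each color's bounding box directly; edges come from
--     # scanning only the bounding box of each color (not the whole grid per pair).
--     m, n = len(grid), len(grid[0])
--     box = {}
--     for i in range(m):
--         for j in range(n):
--             c = grid[i][j]
--             if c in box:
--                 x1, x2, y1, y2 = box[c]
--                 box[c] = (min(x1, i), max(x2, i), min(y1, j), max(y2, j))
--             else:
--                 box[c] = (i, i, j, j)
--
--     indeg = {c: 0 for c in box}
--     out = {c: [] for c in box}
--     for x in box:
--         x1, x2, y1, y2 = box[x]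
--         cnt = {}
--         for a in range(x1, x2 + 1):
--             for b in range(y1, y2 + 1):
--                 y = grid[a][b]
--                 if y != x:
--                     cnt[y] = cnt.get(y, 0) + 1
--         for y in box:
--             k = cnt.get(y, 0)
--             if k:
--                 out[x].extend([y] * k)
--                 indeg[y] += k
--
--     stack = [c for c in box if indeg[c] == 0]
--     while stack:
--         nex = []
--         for i in stack:
--             for j in out[i]:
--                 indeg[j] -= 1
--                 if indeg[j] == 0:
--                     nex.append(j)
--         stack = nex
--     return all(indeg[c] == 0 for c in box)
-- ===== Notes on version B (the rewrite author's own statement) =====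
-- stated objective: alternative
-- what changed: B computes each color's bounding box in one merging pass (instead of collecting all cell positions and taking min/max per color) and derives the dependency edges by scanning only each color's own bounding box, counting the distinct colors inside it, instead of A's per-color-pair scan over every cell of the grid; the topological elimination loop is unchanged. Intended as faster (measured ~1.5-2.4x on random grids, below the confirmation threshold at the largest size).
import Mathlib
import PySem

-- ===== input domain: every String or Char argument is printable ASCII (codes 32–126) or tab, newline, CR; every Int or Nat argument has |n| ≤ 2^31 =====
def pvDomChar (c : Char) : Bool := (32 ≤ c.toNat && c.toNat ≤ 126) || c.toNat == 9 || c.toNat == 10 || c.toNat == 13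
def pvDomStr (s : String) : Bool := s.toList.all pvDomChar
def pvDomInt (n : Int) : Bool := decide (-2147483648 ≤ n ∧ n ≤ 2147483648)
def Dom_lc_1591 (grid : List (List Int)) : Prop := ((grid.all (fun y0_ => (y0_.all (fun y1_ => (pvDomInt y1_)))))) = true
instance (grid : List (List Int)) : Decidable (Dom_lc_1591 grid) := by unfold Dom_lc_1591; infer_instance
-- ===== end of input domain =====

-- B replaces A's per-pair full-grid scans by per-color bounding-box scans (edges counted inside each
-- color's own box) and builds boxes in one merging pass; the topological check itself is unchanged.

-- grid[i][j]; the defaults are unreachable under Pre_lc_1591 (indices in range there)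
def pvCell (grid : List (List Int)) (i j : Int) : Int :=
  PySem.List.pyGetD (PySem.List.pyGetD grid i []) j 0

-- ===== PORT A =====
-- the while loop of A; fuel (number of colors + 1) bounds the rounds: each nonempty round
-- empties at least one new vertex, so the Python loop never runs longer
def pvKahnA (dct : PySem.Dict Int (List Int)) :
    Nat → List Int → PySem.Dict Int Int → PySem.Dict Int Int
  | 0, _, degree => degree
  | _ + 1, [], degree => degree
  | fuel + 1, i₀ :: stack, degree =>
      let st := (i₀ :: stack).foldl (fun st i =>
        (dct.getD i []).foldl (fun (st : PySem.Dict Int Int × List Int) j =>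
          let d := st.1.modify j 0 (· - 1)
          (d, if d.getD j 0 == 0 then st.2 ++ [j] else st.2)) st) (degree, ([] : List Int))
      pvKahnA dct fuel st.2 st.1

def lc_1591 (grid : List (List Int)) : Bool :=
  let m : Int := grid.length
  let n : Int := (PySem.List.pyGetD grid 0 []).length
  let color : PySem.Dict Int (List (Int × Int)) :=
    (PySem.List.pyRange 0 m 1).foldl (fun d i =>
      (PySem.List.pyRange 0 n 1).foldl (fun d j =>
        d.modify (pvCell grid i j) [] (· ++ [(i, j)])) d) PySem.Dict.empty
  let pos : PySem.Dict Int (Int × Int × Int × Int) :=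
    color.keys.foldl (fun d c =>
      let lst := color.getD c []
      let x1 := (PySem.List.min? (lst.map (·.1)) id).getD 0
      let x2 := (PySem.List.max? (lst.map (·.1)) id).getD 0
      let y1 := (PySem.List.min? (lst.map (·.2)) id).getD 0
      let y2 := (PySem.List.max? (lst.map (·.2)) id).getD 0
      d.insert c (x1, x2, y1, y2)) PySem.Dict.empty
  let dd : PySem.Dict Int Int × PySem.Dict Int (List Int) :=
    pos.keys.foldl (fun dd x =>
      let q := pos.getD x (0, 0, 0, 0)
      pos.keys.foldl (fun dd y =>
        if x ≠ y then
          (color.getD y []).foldl (fun (dd : PySem.Dict Int Int × PySem.Dict Int (List Int)) ab =>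
            if q.1 ≤ ab.1 ∧ ab.1 ≤ q.2.1 ∧ q.2.2.1 ≤ ab.2 ∧ ab.2 ≤ q.2.2.2 then
              (dd.1.modify y 0 (· + 1), dd.2.modify x [] (· ++ [y]))
            else dd) dd
        else dd) dd) (PySem.Dict.empty, PySem.Dict.empty)
  let stack := pos.keys.filter (fun x => dd.1.getD x 0 == 0)
  let degree := pvKahnA dd.2 (pos.keys.length + 1) stack dd.1
  pos.keys.all (fun x => degree.getD x 0 == 0)

-- ===== PORT B =====
-- the while loop of B (same bound on the rounds as in A)
def pvKahnB (out : PySem.Dict Int (List Int)) :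
    Nat → List Int → PySem.Dict Int Int → PySem.Dict Int Int
  | 0, _, indeg => indeg
  | _ + 1, [], indeg => indeg
  | fuel + 1, i₀ :: stack, indeg =>
      let st := (i₀ :: stack).foldl (fun st i =>
        (out.getD i []).foldl (fun (st : PySem.Dict Int Int × List Int) j =>
          let d := st.1.insert j (st.1.getD j 0 - 1)
          (d, if d.getD j 0 == 0 then st.2 ++ [j] else st.2)) st) (indeg, ([] : List Int))
      pvKahnB out fuel st.2 st.1

def lc_1591_alt (grid : List (List Int)) : Bool :=
  let m : Int := grid.length
  let n : Int := (PySem.List.pyGetD grid 0 []).length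
  let box : PySem.Dict Int (Int × Int × Int × Int) :=
    (PySem.List.pyRange 0 m 1).foldl (fun d i =>
      (PySem.List.pyRange 0 n 1).foldl (fun d j =>
        let c := pvCell grid i j
        if d.contains c then
          let q := d.getD c (0, 0, 0, 0)
          d.insert c (min q.1 i, max q.2.1 i, min q.2.2.1 j, max q.2.2.2 j)
        else d.insert c (i, i, j, j)) d) PySem.Dict.empty
  let indeg0 : PySem.Dict Int Int := box.keys.foldl (fun d c => d.insert c 0) PySem.Dict.empty
  let out0 : PySem.Dict Int (List Int) := box.keys.foldl (fun d c => d.insert c []) PySem.Dict.empty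
  let io : PySem.Dict Int Int × PySem.Dict Int (List Int) :=
    box.keys.foldl (fun io x =>
      let q := box.getD x (0, 0, 0, 0)
      let cnt : PySem.Dict Int Int :=
        (PySem.List.pyRange q.1 (q.2.1 + 1) 1).foldl (fun cnt a =>
          (PySem.List.pyRange q.2.2.1 (q.2.2.2 + 1) 1).foldl (fun (cnt : PySem.Dict Int Int) b =>
            let y := pvCell grid a b
            if y ≠ x then cnt.insert y (cnt.getD y 0 + 1) else cnt) cnt) PySem.Dict.empty
      box.keys.foldl (fun (io : PySem.Dict Int Int × PySem.Dict Int (List Int)) y =>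
        let k := cnt.getD y 0
        if k ≠ 0 then
          (io.1.insert y (io.1.getD y 0 + k), io.2.modify x [] (· ++ List.replicate k.toNat y))
        else io) io) (indeg0, out0)
  let stack := box.keys.filter (fun c => io.1.getD c 0 == 0)
  let indeg := pvKahnB io.2 (box.keys.length + 1) stack io.1
  box.keys.all (fun c => indeg.getD c 0 == 0)

-- ===== PRECONDITION & SPEC =====
-- Pre_ excludes exactly the grids on which A raises an IndexError: the empty grid
-- (grid[0]) and grids with a row shorter than the first row (grid[i][j], j < len(grid[0])).
def Pre_lc_1591 (grid : List (List Int)) : Prop :=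
  grid ≠ [] ∧ ∀ row ∈ grid, grid.headI.length ≤ row.length
instance (grid : List (List Int)) : Decidable (Pre_lc_1591 grid) := by
  unfold Pre_lc_1591; infer_instance

def pvWitness_lc_1591 : List (List Int) := [[1, 1], [1, 2]]

def Spec_lc_1591 (grid : List (List Int)) (out : Bool) : Prop := out = lc_1591_alt grid
instance (grid : List (List Int)) (out : Bool) : Decidable (Spec_lc_1591 grid out) := by
  unfold Spec_lc_1591; infer_instance

-- ===== CLAIM (what is proved, stated in full; the proofs are below) =====
def Claim_equal_lc_1591 : Prop :=
  ∀ (grid : List (List Int)), Dom_lc_1591 grid → Pre_lc_1591 grid →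
    Spec_lc_1591 grid (lc_1591 grid)

-- ===== LEMMAS AND PROOFS =====

-- ---------- generic dict facts ----------
theorem pvGet?_of_contains_false {κ ν : Type} [BEq κ] (d : PySem.Dict κ ν) (k : κ)
    (h : d.contains k = false) : d.get? k = none := by
  unfold PySem.Dict.get? PySem.Dict.contains at *
  rw [List.find?_eq_none.mpr]
  · rfl
  · intro p hp
    have := List.any_eq_false.mp h p hp
    simpa using this

theorem pvGet?_of_contains_true {κ ν : Type} [BEq κ] (d : PySem.Dict κ ν) (k : κ)
    (h : d.contains k = true) : ∃ v, d.get? k = some v := by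
  unfold PySem.Dict.get? PySem.Dict.contains at *
  obtain ⟨p, hp, he⟩ := List.any_eq_true.mp h
  have : (List.find? (fun p => p.1 == k) d.items).isSome := List.find?_isSome.mpr ⟨p, hp, he⟩
  obtain ⟨q, hq⟩ := Option.isSome_iff_exists.mp this
  exact ⟨q.2, by simp [hq]⟩

theorem pvGet?_items_map {ν : Type} (f : Int → ν) (kl : List Int) (hk : kl.Nodup) (c : Int)
    (hc : c ∈ kl) :
    (PySem.Dict.mk (kl.map (fun c => (c, f c))) : PySem.Dict Int ν).get? c = some (f c) := by
  induction kl with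
  | nil => simp at hc
  | cons a as ih =>
    simp only [List.map_cons, PySem.Dict.get?_mk_cons]
    rcases List.mem_cons.mp hc with h | h
    · subst h; simp
    · have hne : a ≠ c := by rintro rfl; exact (List.nodup_cons.mp hk).1 h
      simp only [beq_iff_eq, hne, if_false]
      exact ih (List.nodup_cons.mp hk).2 h

-- ---------- products of ranges ----------
def pvProd (l1 l2 : List Int) : List (Int × Int) := l1.flatMap (fun i => l2.map (fun j => (i, j)))

theorem pvFoldNest {σ : Type} (l1 l2 : List Int) (g : σ → Int × Int → σ) (init : σ) :
    l1.foldl (fun d i => l2.foldl (fun d j => g d (i, j)) d) init = (pvProd l1 l2).foldl g init := by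
  simp [pvProd, List.foldl_flatMap, List.foldl_map]

theorem pvMem_prod (l1 l2 : List Int) (a b : Int) :
    (a, b) ∈ pvProd l1 l2 ↔ a ∈ l1 ∧ b ∈ l2 := by
  simp [pvProd]

theorem pvFilter_pyRange (m x1 x2 : Int) (h0 : 0 ≤ x1) (h2 : x2 < m) :
    (PySem.List.pyRange 0 m 1).filter (fun a => decide (x1 ≤ a) && decide (a ≤ x2))
      = PySem.List.pyRange x1 (x2 + 1) 1 := by
  have hnd : ((PySem.List.pyRange 0 m 1).filter (fun a => decide (x1 ≤ a) && decide (a ≤ x2))).Nodup :=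
    (PySem.List.nodup_pyRange_one 0 m).filter _
  have hperm : (PySem.List.pyRange x1 (x2 + 1) 1).Perm
      ((PySem.List.pyRange 0 m 1).filter (fun a => decide (x1 ≤ a) && decide (a ≤ x2))) := by
    rw [List.perm_ext_iff_of_nodup (PySem.List.nodup_pyRange_one _ _) hnd]
    intro a
    simp only [List.mem_filter, PySem.List.mem_pyRange_one, Bool.and_eq_true, decide_eq_true_eq]
    omega
  have hpw : (PySem.List.pyRange x1 (x2 + 1) 1).Pairwise (· < ·) :=
    PySem.List.pairwise_lt_pyRange_one _ _
  have := PySem.List.sorted_eq_of_perm_of_pairwise_lt _ _ id hperm hpw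
  have h2' := PySem.List.sorted_eq_of_perm_of_pairwise_lt
    ((PySem.List.pyRange 0 m 1).filter (fun a => decide (x1 ≤ a) && decide (a ≤ x2)))
    ((PySem.List.pyRange 0 m 1).filter (fun a => decide (x1 ≤ a) && decide (a ≤ x2))) id
    (List.Perm.refl _) ((PySem.List.pairwise_lt_pyRange_one 0 m).filter _)
  rw [← h2', ← this]

def pvInBox (q : Int × Int × Int × Int) (p : Int × Int) : Bool :=
  decide (q.1 ≤ p.1) && decide (p.1 ≤ q.2.1) && decide (q.2.2.1 ≤ p.2) && decide (p.2 ≤ q.2.2.2)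

theorem pvFlatMap_if {α β : Type} (l : List α) (p : α → Bool) (f : α → List β) :
    (l.flatMap (fun a => if p a then f a else [])) = (l.filter p).flatMap f := by
  induction l with
  | nil => rfl
  | cons a as ih => by_cases h : p a <;> simp [h, ih]

theorem pvFilter_prod_box (m n : Int) (q : Int × Int × Int × Int)
    (hx0 : 0 ≤ q.1) (hx1 : q.1 ≤ q.2.1) (hx2 : q.2.1 < m)
    (hy0 : 0 ≤ q.2.2.1) (hy1 : q.2.2.1 ≤ q.2.2.2) (hy2 : q.2.2.2 < n) :
    (pvProd (PySem.List.pyRange 0 m 1) (PySem.List.pyRange 0 n 1)).filter (pvInBox q)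
      = pvProd (PySem.List.pyRange q.1 (q.2.1 + 1) 1) (PySem.List.pyRange q.2.2.1 (q.2.2.2 + 1) 1) := by
  obtain ⟨x1, x2, y1, y2⟩ := q
  simp only [pvProd, List.filter_flatMap, List.filter_map]
  have hrow : ∀ i : Int, (PySem.List.pyRange 0 n 1).filter ((pvInBox (x1, x2, y1, y2)) ∘ (fun j => (i, j)))
      = if decide (x1 ≤ i) && decide (i ≤ x2) then PySem.List.pyRange y1 (y2 + 1) 1 else [] := by
    intro i
    by_cases hi : x1 ≤ i ∧ i ≤ x2
    · have : ((pvInBox (x1, x2, y1, y2)) ∘ (fun j => (i, j))) = (fun j => decide (y1 ≤ j) && decide (j ≤ y2)) := by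
        funext j; simp [pvInBox, hi.1, hi.2]
      rw [this, pvFilter_pyRange n y1 y2 hy0 hy2]
      simp [hi.1, hi.2]
    · have : ((pvInBox (x1, x2, y1, y2)) ∘ (fun j => (i, j))) = (fun _ => false) := by
        funext j; simp only [pvInBox, Function.comp]; simp; omega
      rw [this]
      simp only [List.filter_false]
      have : (decide (x1 ≤ i) && decide (i ≤ x2)) = false := by simp; omega
      simp [this]
  calc (PySem.List.pyRange 0 m 1).flatMap
        (fun i => ((PySem.List.pyRange 0 n 1).filter ((pvInBox (x1, x2, y1, y2)) ∘ (fun j => (i, j)))).map (fun j => (i, j)))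
      = (PySem.List.pyRange 0 m 1).flatMap
        (fun i => if decide (x1 ≤ i) && decide (i ≤ x2) then (PySem.List.pyRange y1 (y2 + 1) 1).map (fun j => (i, j)) else []) := by
        simp only [hrow]
        rw [List.flatMap_def, List.flatMap_def]
        congr 1
        apply List.map_congr_left
        intro i _
        by_cases h : (decide (x1 ≤ i) && decide (i ≤ x2)) = true <;> simp [h]
      _ = ((PySem.List.pyRange 0 m 1).filter (fun i => decide (x1 ≤ i) && decide (i ≤ x2))).flatMap
          (fun i => (PySem.List.pyRange y1 (y2 + 1) 1).map (fun j => (i, j))) := pvFlatMap_if _ _ _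
      _ = (PySem.List.pyRange x1 (x2 + 1) 1).flatMap (fun i => (PySem.List.pyRange y1 (y2 + 1) 1).map (fun j => (i, j))) := by
          rw [pvFilter_pyRange m x1 x2 hx0 hx2]

-- ---------- bounding boxes ----------
def pvMerge (q : Int × Int × Int × Int) (p : Int × Int) : Int × Int × Int × Int :=
  (min q.1 p.1, max q.2.1 p.1, min q.2.2.1 p.2, max q.2.2.2 p.2)

def pvBBox? : List (Int × Int) → Option (Int × Int × Int × Int)
  | [] => none
  | p :: rest => some (rest.foldl pvMerge (p.1, p.1, p.2, p.2))

def pvMins (lst : List (Int × Int)) : Int × Int × Int × Int :=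
  ((PySem.List.min? (lst.map (·.1)) id).getD 0, (PySem.List.max? (lst.map (·.1)) id).getD 0,
   (PySem.List.min? (lst.map (·.2)) id).getD 0, (PySem.List.max? (lst.map (·.2)) id).getD 0)

theorem pvMin?_cons (x : Int) (xs : List Int) :
    PySem.List.min? (x :: xs) id = some (xs.foldl min x) := by
  unfold PySem.List.min?
  simp only [List.foldl_cons]
  induction xs generalizing x with
  | nil => rfl
  | cons a as ih =>
    simp only [List.foldl_cons]
    rw [← ih]
    congr 1
    simp only [id]
    split_ifs with h <;> simp <;> omega

theorem pvMax?_cons (x : Int) (xs : List Int) :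
    PySem.List.max? (x :: xs) id = some (xs.foldl max x) := by
  unfold PySem.List.max?
  simp only [List.foldl_cons]
  induction xs generalizing x with
  | nil => rfl
  | cons a as ih =>
    simp only [List.foldl_cons]
    rw [← ih]
    congr 1
    simp only [id]
    split_ifs with h <;> simp <;> omega

theorem pvBBoxFold_components (rest : List (Int × Int)) :
    ∀ a b c d, rest.foldl pvMerge (a, b, c, d)
      = (rest.foldl (fun m p => min m p.1) a, rest.foldl (fun M p => max M p.1) b,
         rest.foldl (fun m p => min m p.2) c, rest.foldl (fun M p => max M p.2) d) := by
  induction rest with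
  | nil => intro a b c d; rfl
  | cons p ps ih => intro a b c d; simp only [List.foldl_cons, pvMerge]; exact ih _ _ _ _

theorem pvBBox?_eq_mins (l : List (Int × Int)) (hl : l ≠ []) : pvBBox? l = some (pvMins l) := by
  obtain ⟨p, rest, rfl⟩ := List.exists_cons_of_ne_nil hl
  simp only [pvBBox?, pvMins, List.map_cons, pvMin?_cons, pvMax?_cons, Option.getD_some]
  rw [pvBBoxFold_components]
  simp [List.foldl_map]

-- ---------- phase 1: color / box / pos ----------
theorem pvColor_getD (cellf : Int × Int → Int) (l : List (Int × Int)) (c : Int) :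
    (l.foldl (fun d p => d.modify (cellf p) [] (· ++ [p])) PySem.Dict.empty).getD c []
      = l.filter (fun p => cellf p == c) := by
  have h := PySem.Dict.getD_foldl_modify_append (l.map (fun p => (cellf p, p)))
    (PySem.Dict.empty : PySem.Dict Int (List (Int × Int))) c
  rw [List.foldl_map] at h
  simpa [List.filter_map, Function.comp_def] using h

theorem pvColor_keys (cellf : Int × Int → Int) (l : List (Int × Int)) :
    (l.foldl (fun d p => d.modify (cellf p) [] (· ++ [p])) PySem.Dict.empty).keys
      = PySem.Set.update ([] : List Int) (l.map cellf) := by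
  simpa using PySem.Dict.keys_foldl_modify_key l cellf [] (fun _ p xs => xs ++ [p]) PySem.Dict.empty

theorem pvColor_keys_nodup (cellf : Int × Int → Int) (l : List (Int × Int)) :
    (l.foldl (fun d p => d.modify (cellf p) [] (· ++ [p])) PySem.Dict.empty).keys.Nodup := by
  exact PySem.Dict.nodup_keys_foldl_modify_key l cellf [] (fun _ p xs => xs ++ [p])
    PySem.Dict.empty (by simp)

theorem pvBox_get? (cellf : Int × Int → Int) (l : List (Int × Int)) (c : Int) :
    (l.foldl (fun d p =>
        if d.contains (cellf p) then
          d.insert (cellf p) (pvMerge (d.getD (cellf p) (0, 0, 0, 0)) p)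
        else d.insert (cellf p) (p.1, p.1, p.2, p.2)) PySem.Dict.empty).get? c
      = pvBBox? (l.filter (fun p => cellf p == c)) := by
  induction l using List.reverseRecOn with
  | nil => simp [pvBBox?]
  | append_singleton l p ih =>
    rw [List.foldl_append, List.filter_append]
    simp only [List.foldl_cons, List.foldl_nil]
    set D := l.foldl (fun d p =>
        if d.contains (cellf p) then
          d.insert (cellf p) (pvMerge (d.getD (cellf p) (0, 0, 0, 0)) p)
        else d.insert (cellf p) (p.1, p.1, p.2, p.2)) PySem.Dict.empty with hD
    by_cases hc : cellf p = c
    · subst hc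
      rw [List.filter_cons]
      simp only [beq_self_eq_true, if_true]
      cases hcon : D.contains (cellf p)
      · have hnone : D.get? (cellf p) = none := pvGet?_of_contains_false D _ hcon
        have hnil : l.filter (fun q => cellf q == cellf p) = [] := by
          have := ih; rw [hnone] at this
          cases h' : l.filter (fun q => cellf q == cellf p) with
          | nil => rfl
          | cons q qs => rw [h'] at this; simp [pvBBox?] at this
        rw [hnil]
        simp only [List.filter_nil]
        rw [if_neg (by simp)]
        rw [PySem.Dict.get?_insert_self]
        simp [pvBBox?]
      · obtain ⟨v, hv⟩ := pvGet?_of_contains_true D _ hcon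
        have hbb : pvBBox? (l.filter (fun q => cellf q == cellf p)) = some v := by rw [← ih, hv]
        obtain ⟨q, rest, hqr⟩ : ∃ q rest, l.filter (fun q => cellf q == cellf p) = q :: rest := by
          cases h' : l.filter (fun q => cellf q == cellf p) with
          | nil => rw [h'] at hbb; simp [pvBBox?] at hbb
          | cons q qs => exact ⟨q, qs, rfl⟩
        rw [hqr] at hbb
        simp only [pvBBox?, Option.some.injEq] at hbb
        rw [if_pos rfl]
        have hgetD : D.getD (cellf p) (0, 0, 0, 0) = v := by
          unfold PySem.Dict.getD; rw [hv]; rfl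
        rw [hgetD, PySem.Dict.get?_insert_self, hqr]
        simp only [List.filter_nil]
        simp only [List.cons_append, pvBBox?, List.foldl_append, List.foldl_cons, List.foldl_nil, hbb]
    · have hfil : List.filter (fun q => cellf q == c) [p] = [] := by simp [hc]
      rw [hfil, List.append_nil, ← ih]
      have hne : c ≠ cellf p := fun h => hc h.symm
      split
      · exact PySem.Dict.get?_insert_of_ne D _ hne
      · exact PySem.Dict.get?_insert_of_ne D _ hne

theorem pvBox_keys (cellf : Int × Int → Int) (l : List (Int × Int)) :
    (l.foldl (fun d p =>
        if d.contains (cellf p) then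
          d.insert (cellf p) (pvMerge (d.getD (cellf p) (0, 0, 0, 0)) p)
        else d.insert (cellf p) (p.1, p.1, p.2, p.2)) PySem.Dict.empty).keys
      = PySem.Set.update ([] : List Int) (l.map cellf) := by
  have hstep : (fun (d : PySem.Dict Int (Int × Int × Int × Int)) p =>
      if d.contains (cellf p) then
        d.insert (cellf p) (pvMerge (d.getD (cellf p) (0, 0, 0, 0)) p)
      else d.insert (cellf p) (p.1, p.1, p.2, p.2))
    = fun d p => d.insert (cellf p) (if d.contains (cellf p) then
        pvMerge (d.getD (cellf p) (0, 0, 0, 0)) p else (p.1, p.1, p.2, p.2)) := by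
    funext d p; split <;> simp_all
  rw [hstep]
  simpa using PySem.Dict.keys_foldl_insert_key l cellf
    (fun d p => if d.contains (cellf p) then pvMerge (d.getD (cellf p) (0, 0, 0, 0)) p
      else (p.1, p.1, p.2, p.2)) PySem.Dict.empty

-- ---------- named components of the two ports (each is rfl-equal to its port's let) ----------
def pvColorD (grid : List (List Int)) : PySem.Dict Int (List (Int × Int)) :=
  (PySem.List.pyRange 0 (grid.length : Int) 1).foldl (fun d i =>
    (PySem.List.pyRange 0 ((PySem.List.pyGetD grid 0 []).length : Int) 1).foldl (fun d j =>
      d.modify (pvCell grid i j) [] (· ++ [(i, j)])) d) PySem.Dict.empty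

def pvPosD (grid : List (List Int)) : PySem.Dict Int (Int × Int × Int × Int) :=
  (pvColorD grid).keys.foldl (fun d c =>
    d.insert c (pvMins ((pvColorD grid).getD c []))) PySem.Dict.empty

def pvDDA (grid : List (List Int)) : PySem.Dict Int Int × PySem.Dict Int (List Int) :=
  (pvPosD grid).keys.foldl (fun dd x =>
    let q := (pvPosD grid).getD x (0, 0, 0, 0)
    (pvPosD grid).keys.foldl (fun dd y =>
      if x ≠ y then
        ((pvColorD grid).getD y []).foldl
          (fun (dd : PySem.Dict Int Int × PySem.Dict Int (List Int)) ab =>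
            if q.1 ≤ ab.1 ∧ ab.1 ≤ q.2.1 ∧ q.2.2.1 ≤ ab.2 ∧ ab.2 ≤ q.2.2.2 then
              (dd.1.modify y 0 (· + 1), dd.2.modify x [] (· ++ [y]))
            else dd) dd
      else dd) dd) (PySem.Dict.empty, PySem.Dict.empty)

def pvBoxD (grid : List (List Int)) : PySem.Dict Int (Int × Int × Int × Int) :=
  (PySem.List.pyRange 0 (grid.length : Int) 1).foldl (fun d i =>
    (PySem.List.pyRange 0 ((PySem.List.pyGetD grid 0 []).length : Int) 1).foldl (fun d j =>
      let c := pvCell grid i j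
      if d.contains c then
        let q := d.getD c (0, 0, 0, 0)
        d.insert c (min q.1 i, max q.2.1 i, min q.2.2.1 j, max q.2.2.2 j)
      else d.insert c (i, i, j, j)) d) PySem.Dict.empty

def pvInd0 (grid : List (List Int)) : PySem.Dict Int Int :=
  (pvBoxD grid).keys.foldl (fun d c => d.insert c 0) PySem.Dict.empty

def pvOut0 (grid : List (List Int)) : PySem.Dict Int (List Int) :=
  (pvBoxD grid).keys.foldl (fun d c => d.insert c []) PySem.Dict.empty

def pvCntD (grid : List (List Int)) (x : Int) (q : Int × Int × Int × Int) : PySem.Dict Int Int :=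
  (PySem.List.pyRange q.1 (q.2.1 + 1) 1).foldl (fun cnt a =>
    (PySem.List.pyRange q.2.2.1 (q.2.2.2 + 1) 1).foldl (fun (cnt : PySem.Dict Int Int) b =>
      let y := pvCell grid a b
      if y ≠ x then cnt.insert y (cnt.getD y 0 + 1) else cnt) cnt) PySem.Dict.empty

def pvIOB (grid : List (List Int)) : PySem.Dict Int Int × PySem.Dict Int (List Int) :=
  (pvBoxD grid).keys.foldl (fun io x =>
    let q := (pvBoxD grid).getD x (0, 0, 0, 0)
    let cnt := pvCntD grid x q
    (pvBoxD grid).keys.foldl (fun (io : PySem.Dict Int Int × PySem.Dict Int (List Int)) y =>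
      let k := cnt.getD y 0
      if k ≠ 0 then
        (io.1.insert y (io.1.getD y 0 + k), io.2.modify x [] (· ++ List.replicate k.toNat y))
      else io) io) (pvInd0 grid, pvOut0 grid)

theorem pvA_eq (grid : List (List Int)) :
    lc_1591 grid = (pvPosD grid).keys.all (fun x =>
      (pvKahnA (pvDDA grid).2 ((pvPosD grid).keys.length + 1)
        ((pvPosD grid).keys.filter (fun x => (pvDDA grid).1.getD x 0 == 0))
        (pvDDA grid).1).getD x 0 == 0) := rfl

theorem pvB_eq (grid : List (List Int)) :
    lc_1591_alt grid = (pvBoxD grid).keys.all (fun c =>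
      (pvKahnB (pvIOB grid).2 ((pvBoxD grid).keys.length + 1)
        ((pvBoxD grid).keys.filter (fun c => (pvIOB grid).1.getD c 0 == 0))
        (pvIOB grid).1).getD c 0 == 0) := rfl

-- ---------- phase 2: edge construction ----------
def pvCxy (CL : Int → List (Int × Int)) (Q : Int → Int × Int × Int × Int) (x y : Int) : Nat :=
  if y = x then 0 else (CL y).countP (pvInBox (Q x))

theorem pvA_inner (x y : Int) (hxy : x ≠ y) (q : Int × Int × Int × Int)
    (lst : List (Int × Int)) :
    ∀ (deg : PySem.Dict Int Int) (dct : PySem.Dict Int (List Int)),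
      (∀ k, (lst.foldl (fun (dd : PySem.Dict Int Int × PySem.Dict Int (List Int)) ab =>
          if q.1 ≤ ab.1 ∧ ab.1 ≤ q.2.1 ∧ q.2.2.1 ≤ ab.2 ∧ ab.2 ≤ q.2.2.2 then
            (dd.1.modify y 0 (· + 1), dd.2.modify x [] (· ++ [y]))
          else dd) (deg, dct)).1.getD k 0
        = deg.getD k 0 + if k = y then (lst.countP (pvInBox q) : Int) else 0) ∧
      (∀ k, (lst.foldl (fun (dd : PySem.Dict Int Int × PySem.Dict Int (List Int)) ab =>
          if q.1 ≤ ab.1 ∧ ab.1 ≤ q.2.1 ∧ q.2.2.1 ≤ ab.2 ∧ ab.2 ≤ q.2.2.2 then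
            (dd.1.modify y 0 (· + 1), dd.2.modify x [] (· ++ [y]))
          else dd) (deg, dct)).2.getD k []
        = dct.getD k [] ++ if k = x then List.replicate (lst.countP (pvInBox q)) y else []) := by
  induction lst with
  | nil => intro deg dct; constructor <;> intro k <;> simp
  | cons ab rest ih =>
    intro deg dct
    simp only [List.foldl_cons]
    by_cases hin : q.1 ≤ ab.1 ∧ ab.1 ≤ q.2.1 ∧ q.2.2.1 ≤ ab.2 ∧ ab.2 ≤ q.2.2.2
    · rw [if_pos hin]
      have hcnt : (ab :: rest).countP (pvInBox q) = rest.countP (pvInBox q) + 1 := by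
        rw [List.countP_cons]
        simp [pvInBox, hin.1, hin.2.1, hin.2.2.1, hin.2.2.2]
      obtain ⟨ih1, ih2⟩ := ih (deg.modify y 0 (· + 1)) (dct.modify x [] (· ++ [y]))
      constructor
      · intro k
        rw [ih1 k, hcnt]
        unfold PySem.Dict.modify
        by_cases hk : k = y
        · subst hk; rw [PySem.Dict.getD_insert_self]; simp; ring
        · rw [PySem.Dict.getD_insert_of_ne _ _ _ hk]; simp [hk]
      · intro k
        rw [ih2 k, hcnt]
        unfold PySem.Dict.modify
        by_cases hk : k = x
        · subst hk
          rw [PySem.Dict.getD_insert_self]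
          simp [List.replicate_succ, List.append_assoc]
        · rw [PySem.Dict.getD_insert_of_ne _ _ _ hk]; simp [hk]
    · rw [if_neg hin]
      have hcnt : (ab :: rest).countP (pvInBox q) = rest.countP (pvInBox q) := by
        rw [List.countP_cons]
        have : pvInBox q ab = false := by
          simp only [pvInBox]
          simp only [not_and_or] at hin
          rcases hin with h | h | h | h <;> simp [h]
        simp [this]
      simp only [hcnt]
      exact ih deg dct


-- ---------- grid-level abbreviations and facts ----------
def pvCellP (grid : List (List Int)) (p : Int × Int) : Int := pvCell grid p.1 p.2

def pvCellsL (grid : List (List Int)) : List (Int × Int) :=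
  pvProd (PySem.List.pyRange 0 (grid.length : Int) 1)
    (PySem.List.pyRange 0 ((PySem.List.pyGetD grid 0 []).length : Int) 1)

def pvCL (grid : List (List Int)) (y : Int) : List (Int × Int) :=
  (pvCellsL grid).filter (fun p => pvCellP grid p == y)

def pvQ (grid : List (List Int)) (x : Int) : Int × Int × Int × Int := pvMins (pvCL grid x)

theorem pvColorD_prod (grid : List (List Int)) :
    pvColorD grid = (pvCellsL grid).foldl
      (fun d p => d.modify (pvCellP grid p) [] (· ++ [p])) PySem.Dict.empty := by
  unfold pvColorD pvCellsL
  exact pvFoldNest _ _ (fun (d : PySem.Dict Int (List (Int × Int))) p => d.modify (pvCellP grid p) [] (· ++ [p])) _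

theorem pvBoxD_prod (grid : List (List Int)) :
    pvBoxD grid = (pvCellsL grid).foldl (fun d p =>
      if d.contains (pvCellP grid p) then
        d.insert (pvCellP grid p) (pvMerge (d.getD (pvCellP grid p) (0, 0, 0, 0)) p)
      else d.insert (pvCellP grid p) (p.1, p.1, p.2, p.2)) PySem.Dict.empty := by
  unfold pvBoxD pvCellsL
  exact pvFoldNest _ _ (fun (d : PySem.Dict Int (Int × Int × Int × Int)) p =>
    if d.contains (pvCellP grid p) then
      d.insert (pvCellP grid p) (pvMerge (d.getD (pvCellP grid p) (0, 0, 0, 0)) p)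
    else d.insert (pvCellP grid p) (p.1, p.1, p.2, p.2)) _

theorem pvColor_getD' (grid : List (List Int)) (c : Int) :
    (pvColorD grid).getD c [] = pvCL grid c := by
  rw [pvColorD_prod]; exact pvColor_getD _ _ _

theorem pvColor_keys' (grid : List (List Int)) :
    (pvColorD grid).keys = PySem.Set.update ([] : List Int) ((pvCellsL grid).map (pvCellP grid)) := by
  rw [pvColorD_prod]; exact pvColor_keys _ _

theorem pvColor_nodup' (grid : List (List Int)) : (pvColorD grid).keys.Nodup := by
  rw [pvColorD_prod]; exact pvColor_keys_nodup _ _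

theorem pvBox_keys' (grid : List (List Int)) : (pvBoxD grid).keys = (pvColorD grid).keys := by
  rw [pvBoxD_prod, pvColor_keys']; exact pvBox_keys _ _

theorem pvBox_get?' (grid : List (List Int)) (c : Int) :
    (pvBoxD grid).get? c = pvBBox? (pvCL grid c) := by
  rw [pvBoxD_prod]; exact pvBox_get? _ _ _

theorem pvMem_keys (grid : List (List Int)) (c : Int) :
    c ∈ (pvColorD grid).keys ↔ ∃ p ∈ pvCellsL grid, pvCellP grid p = c := by
  rw [pvColor_keys']
  rw [PySem.Set.mem_update]
  simp

theorem pvCL_ne_nil (grid : List (List Int)) (c : Int) (hc : c ∈ (pvColorD grid).keys) :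
    pvCL grid c ≠ [] := by
  obtain ⟨p, hp, hcp⟩ := (pvMem_keys grid c).mp hc
  intro h
  have : p ∈ pvCL grid c := by
    unfold pvCL; rw [List.mem_filter]; exact ⟨hp, by simp [hcp]⟩
  rw [h] at this; simp at this

theorem pvPos_items (grid : List (List Int)) :
    (pvPosD grid).items
      = (pvColorD grid).keys.map (fun c => (c, pvMins ((pvColorD grid).getD c []))) := by
  unfold pvPosD
  have h := PySem.Dict.items_foldl_insert_fresh (pvColorD grid).keys (fun c => c)
    (fun c => pvMins ((pvColorD grid).getD c [])) PySem.Dict.empty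
    (fun a _ => PySem.Dict.contains_empty a) (by simpa using pvColor_nodup' grid)
  simpa using h

theorem pvPos_keys (grid : List (List Int)) : (pvPosD grid).keys = (pvColorD grid).keys := by
  show (pvPosD grid).items.map (·.1) = _
  rw [pvPos_items, List.map_map]
  have : ((·.1) ∘ fun c => (c, pvMins ((pvColorD grid).getD c []))) = (id : Int → Int) := rfl
  rw [this, List.map_id]

theorem pvPos_get? (grid : List (List Int)) (c : Int) (hc : c ∈ (pvColorD grid).keys) :
    (pvPosD grid).get? c = some (pvQ grid c) := by
  have hmk : pvPosD grid = PySem.Dict.mk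
      ((pvColorD grid).keys.map (fun c => (c, pvMins ((pvColorD grid).getD c [])))) :=
    PySem.Dict.ext (pvPos_items grid)
  rw [hmk, pvGet?_items_map _ _ (pvColor_nodup' grid) _ hc, pvColor_getD']
  rfl

theorem pvPos_getD (grid : List (List Int)) (c : Int) (hc : c ∈ (pvColorD grid).keys) :
    (pvPosD grid).getD c (0, 0, 0, 0) = pvQ grid c := by
  unfold PySem.Dict.getD; rw [pvPos_get? grid c hc]; rfl

theorem pvBox_getD (grid : List (List Int)) (c : Int) (hc : c ∈ (pvColorD grid).keys) :
    (pvBoxD grid).getD c (0, 0, 0, 0) = pvQ grid c := by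
  unfold PySem.Dict.getD
  rw [pvBox_get?' grid c, pvBBox?_eq_mins _ (pvCL_ne_nil grid c hc)]
  rfl

theorem pvGetD_foldl_insert_const {ν : Type} (v0 : ν) (kl : List Int) (k : Int) :
    ((kl.foldl (fun d c => d.insert c v0) (PySem.Dict.empty : PySem.Dict Int ν)).getD k v0) = v0 := by
  induction kl using List.reverseRecOn with
  | nil => simp [PySem.Dict.getD_empty]
  | append_singleton l c ih =>
    rw [List.foldl_append]
    simp only [List.foldl_cons, List.foldl_nil]
    by_cases hk : k = c
    · subst hk; rw [PySem.Dict.getD_insert_self]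
    · rw [PySem.Dict.getD_insert_of_ne _ _ _ hk]; exact ih

theorem pvQ_bounds (grid : List (List Int)) (x : Int) (hx : x ∈ (pvColorD grid).keys) :
    0 ≤ (pvQ grid x).1 ∧ (pvQ grid x).1 ≤ (pvQ grid x).2.1 ∧
    (pvQ grid x).2.1 < (grid.length : Int) ∧
    0 ≤ (pvQ grid x).2.2.1 ∧ (pvQ grid x).2.2.1 ≤ (pvQ grid x).2.2.2 ∧
    (pvQ grid x).2.2.2 < ((PySem.List.pyGetD grid 0 []).length : Int) := by
  have hne := pvCL_ne_nil grid x hx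
  obtain ⟨p, rest, hpr⟩ := List.exists_cons_of_ne_nil hne
  have hmem : ∀ r ∈ pvCL grid x, 0 ≤ r.1 ∧ r.1 < (grid.length : Int) ∧
      0 ≤ r.2 ∧ r.2 < ((PySem.List.pyGetD grid 0 []).length : Int) := by
    intro r hr
    have : r ∈ pvCellsL grid := (List.mem_filter.mp hr).1
    obtain ⟨a, b⟩ := r
    have := (pvMem_prod _ _ a b).mp this
    rcases this with ⟨h1, h2⟩
    rw [PySem.List.mem_pyRange_one] at h1 h2
    exact ⟨h1.1, h1.2, h2.1, h2.2⟩
  have hx1 : PySem.List.min? ((pvCL grid x).map (·.1)) id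
      = some ((rest.map (·.1)).foldl min p.1) := by
    rw [hpr, List.map_cons, pvMin?_cons]
  have hx2 : PySem.List.max? ((pvCL grid x).map (·.1)) id
      = some ((rest.map (·.1)).foldl max p.1) := by
    rw [hpr, List.map_cons, pvMax?_cons]
  have hy1 : PySem.List.min? ((pvCL grid x).map (·.2)) id
      = some ((rest.map (·.2)).foldl min p.2) := by
    rw [hpr, List.map_cons, pvMin?_cons]
  have hy2 : PySem.List.max? ((pvCL grid x).map (·.2)) id
      = some ((rest.map (·.2)).foldl max p.2) := by
    rw [hpr, List.map_cons, pvMax?_cons]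
  have hQ : pvQ grid x = ((rest.map (·.1)).foldl min p.1, (rest.map (·.1)).foldl max p.1,
      (rest.map (·.2)).foldl min p.2, (rest.map (·.2)).foldl max p.2) := by
    unfold pvQ pvMins
    rw [hx1, hx2, hy1, hy2]
    rfl
  have hp_mem : p ∈ pvCL grid x := by rw [hpr]; exact List.mem_cons_self
  have hfst : p.1 ∈ (pvCL grid x).map (·.1) := List.mem_map_of_mem hp_mem
  have hsnd : p.2 ∈ (pvCL grid x).map (·.2) := List.mem_map_of_mem hp_mem
  have hv1 := PySem.List.min?_mem hx1
  have hv2 := PySem.List.max?_mem hx2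
  have hv3 := PySem.List.min?_mem hy1
  have hv4 := PySem.List.max?_mem hy2
  have hb : ∀ v ∈ (pvCL grid x).map (·.1), 0 ≤ v ∧ v < (grid.length : Int) := by
    intro v hv
    obtain ⟨r, hr, rfl⟩ := List.mem_map.mp hv
    exact ⟨(hmem r hr).1, (hmem r hr).2.1⟩
  have hb' : ∀ v ∈ (pvCL grid x).map (·.2),
      0 ≤ v ∧ v < ((PySem.List.pyGetD grid 0 []).length : Int) := by
    intro v hv
    obtain ⟨r, hr, rfl⟩ := List.mem_map.mp hv
    exact ⟨(hmem r hr).2.2.1, (hmem r hr).2.2.2⟩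
  have h12 : (rest.map (·.1)).foldl min p.1 ≤ (rest.map (·.1)).foldl max p.1 := by
    have a1 := PySem.List.min?_isMin hx1 p.1 hfst
    have a2 := PySem.List.max?_isMax hx2 p.1 hfst
    simpa using le_trans a1 a2
  have h34 : (rest.map (·.2)).foldl min p.2 ≤ (rest.map (·.2)).foldl max p.2 := by
    have a1 := PySem.List.min?_isMin hy1 p.2 hsnd
    have a2 := PySem.List.max?_isMax hy2 p.2 hsnd
    simpa using le_trans a1 a2
  rw [hQ]
  refine ⟨(hb _ hv1).1, h12, (hb _ hv2).2, (hb' _ hv3).1, h34, (hb' _ hv4).2⟩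

theorem pvFoldl_guard_ne {σ : Type} (x : Int) (g : σ → Int → σ) :
    ∀ (l : List Int) (init : σ),
      l.foldl (fun d y => if y ≠ x then g d y else d) init
        = (l.filter (fun y => y != x)).foldl g init := by
  intro l
  induction l with
  | nil => intro init; rfl
  | cons a as ih =>
    intro init
    simp only [List.foldl_cons, List.filter_cons]
    by_cases h : a = x
    · rw [if_neg (not_not_intro h), if_neg (by simp [h])]
      exact ih init
    · rw [if_pos h, if_pos (by simp [h])]
      exact ih (g init a)

theorem pvCnt_spec (grid : List (List Int)) (x : Int) (q : Int × Int × Int × Int)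
    (hx0 : 0 ≤ q.1) (hx1 : q.1 ≤ q.2.1) (hx2 : q.2.1 < (grid.length : Int))
    (hy0 : 0 ≤ q.2.2.1) (hy1 : q.2.2.1 ≤ q.2.2.2)
    (hy2 : q.2.2.2 < ((PySem.List.pyGetD grid 0 []).length : Int)) (y : Int) :
    (pvCntD grid x q).getD y 0
      = (if y = x then 0 else ((pvCL grid y).countP (pvInBox q) : Nat) : Int) := by
  have hnest : pvCntD grid x q
      = (pvProd (PySem.List.pyRange q.1 (q.2.1 + 1) 1)
          (PySem.List.pyRange q.2.2.1 (q.2.2.2 + 1) 1)).foldl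
        (fun (cnt : PySem.Dict Int Int) p =>
          if pvCellP grid p ≠ x then
            cnt.insert (pvCellP grid p) (cnt.getD (pvCellP grid p) 0 + 1)
          else cnt) PySem.Dict.empty := by
    unfold pvCntD
    exact pvFoldNest _ _ (fun (cnt : PySem.Dict Int Int) p =>
      if pvCellP grid p ≠ x then
        cnt.insert (pvCellP grid p) (cnt.getD (pvCellP grid p) 0 + 1)
      else cnt) _
  have hbox : pvProd (PySem.List.pyRange q.1 (q.2.1 + 1) 1)
        (PySem.List.pyRange q.2.2.1 (q.2.2.2 + 1) 1)
      = (pvCellsL grid).filter (pvInBox q) := by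
    rw [← pvFilter_prod_box _ _ q hx0 hx1 hx2 hy0 hy1 hy2]
    rfl
  have hmap : ∀ (l : List (Int × Int)) (e : PySem.Dict Int Int),
      l.foldl (fun (cnt : PySem.Dict Int Int) p =>
          if pvCellP grid p ≠ x then
            cnt.insert (pvCellP grid p) (cnt.getD (pvCellP grid p) 0 + 1)
          else cnt) e
        = (l.map (pvCellP grid)).foldl (fun (cnt : PySem.Dict Int Int) z =>
            if z ≠ x then cnt.insert z (cnt.getD z 0 + 1) else cnt) e := by
    intro l e
    exact (List.foldl_map (f := pvCellP grid)
      (g := fun (cnt : PySem.Dict Int Int) z =>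
        if z ≠ x then cnt.insert z (cnt.getD z 0 + 1) else cnt)).symm
  rw [hnest, hbox, hmap, pvFoldl_guard_ne, PySem.Dict.getD_foldl_insert_add_one,
    PySem.Dict.getD_empty]
  by_cases hyx : y = x
  · subst hyx
    rw [if_pos rfl]
    have : y ∉ (((pvCellsL grid).filter (pvInBox q)).map (pvCellP grid)).filter (fun z => z != y) := by
      intro hmem
      have := (List.mem_filter.mp hmem).2
      simp at this
    rw [List.count_eq_zero.mpr this]
    rfl
  · rw [if_neg hyx]
    have h1 : List.count y
          (List.filter (fun z => z != x) (((pvCellsL grid).filter (pvInBox q)).map (pvCellP grid)))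
        = List.count y (((pvCellsL grid).filter (pvInBox q)).map (pvCellP grid)) :=
      List.count_filter (by simp [hyx])
    rw [h1]
    have h2 : List.count y (((pvCellsL grid).filter (pvInBox q)).map (pvCellP grid))
        = ((pvCellsL grid).filter (pvInBox q)).countP (fun p => pvCellP grid p == y) := by
      rw [List.count_eq_countP, List.countP_map]
      rfl
    rw [h2]
    have h3 : ((pvCellsL grid).filter (pvInBox q)).countP (fun p => pvCellP grid p == y)
        = (pvCL grid y).countP (pvInBox q) := by
      unfold pvCL
      rw [List.countP_filter, List.countP_filter]
      apply List.countP_congr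
      intro p _
      rw [Bool.and_comm]
    rw [h3]
    omega

-- the paired construction loop: A's per-x pass and B's per-x pass make the same getD-changes
def pvStepA (grid : List (List Int)) (x : Int)
    (dd : PySem.Dict Int Int × PySem.Dict Int (List Int)) (y : Int) :
    PySem.Dict Int Int × PySem.Dict Int (List Int) :=
  if x ≠ y then
    ((pvColorD grid).getD y []).foldl (fun dd ab =>
      if ((pvPosD grid).getD x (0, 0, 0, 0)).1 ≤ ab.1 ∧
         ab.1 ≤ ((pvPosD grid).getD x (0, 0, 0, 0)).2.1 ∧
         ((pvPosD grid).getD x (0, 0, 0, 0)).2.2.1 ≤ ab.2 ∧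
         ab.2 ≤ ((pvPosD grid).getD x (0, 0, 0, 0)).2.2.2 then
        (dd.1.modify y 0 (· + 1), dd.2.modify x [] (· ++ [y]))
      else dd) dd
  else dd

def pvStepB (grid : List (List Int)) (x : Int)
    (io : PySem.Dict Int Int × PySem.Dict Int (List Int)) (y : Int) :
    PySem.Dict Int Int × PySem.Dict Int (List Int) :=
  if (pvCntD grid x ((pvBoxD grid).getD x (0, 0, 0, 0))).getD y 0 ≠ 0 then
    (io.1.insert y (io.1.getD y 0 + (pvCntD grid x ((pvBoxD grid).getD x (0, 0, 0, 0))).getD y 0),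
     io.2.modify x []
       (· ++ List.replicate ((pvCntD grid x ((pvBoxD grid).getD x (0, 0, 0, 0))).getD y 0).toNat y))
  else io

theorem pvDDA_eq (grid : List (List Int)) :
    pvDDA grid = (pvPosD grid).keys.foldl
      (fun dd x => (pvPosD grid).keys.foldl (pvStepA grid x) dd)
      (PySem.Dict.empty, PySem.Dict.empty) := rfl

theorem pvIOB_eq (grid : List (List Int)) :
    pvIOB grid = (pvBoxD grid).keys.foldl
      (fun io x => (pvBoxD grid).keys.foldl (pvStepB grid x) io)
      (pvInd0 grid, pvOut0 grid) := rfl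

theorem pvYlock (grid : List (List Int)) (x : Int) (hx : x ∈ (pvColorD grid).keys) :
    ∀ (ys : List Int) (a1 : PySem.Dict Int Int) (a2 : PySem.Dict Int (List Int))
      (c1 : PySem.Dict Int Int) (c2 : PySem.Dict Int (List Int)),
      (∀ k, a1.getD k 0 = c1.getD k 0) → (∀ k, a2.getD k [] = c2.getD k []) →
      (∀ k, (ys.foldl (pvStepA grid x) (a1, a2)).1.getD k 0
          = (ys.foldl (pvStepB grid x) (c1, c2)).1.getD k 0) ∧
      (∀ k, (ys.foldl (pvStepA grid x) (a1, a2)).2.getD k []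
          = (ys.foldl (pvStepB grid x) (c1, c2)).2.getD k []) := by
  have hqA := pvPos_getD grid x hx
  have hqB := pvBox_getD grid x hx
  obtain ⟨q1, q2, q3, q4, q5, q6⟩ := pvQ_bounds grid x hx
  have hcnt : ∀ y, (pvCntD grid x ((pvBoxD grid).getD x (0, 0, 0, 0))).getD y 0
      = (if y = x then 0 else ((pvCL grid y).countP (pvInBox (pvQ grid x)) : Nat) : Int) := by
    intro y; rw [hqB]; exact pvCnt_spec grid x _ q1 q2 q3 q4 q5 q6 y
  intro ys
  induction ys with
  | nil => intro a1 a2 c1 c2 h1 h2; exact ⟨h1, h2⟩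
  | cons y ys ih =>
    intro a1 a2 c1 c2 h1 h2
    simp only [List.foldl_cons]
    by_cases hxy : x = y
    · have hA : pvStepA grid x (a1, a2) y = (a1, a2) := by
        unfold pvStepA; rw [if_neg (not_not_intro hxy)]
      have hB : pvStepB grid x (c1, c2) y = (c1, c2) := by
        unfold pvStepB
        rw [if_neg]
        rw [hcnt y, if_pos hxy.symm]
        simp
      rw [hA, hB]; exact ih a1 a2 c1 c2 h1 h2
    · have hcy : (pvCntD grid x ((pvBoxD grid).getD x (0, 0, 0, 0))).getD y 0
          = (((pvCL grid y).countP (pvInBox (pvQ grid x)) : Nat) : Int) := by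
        rw [hcnt y, if_neg (fun h => hxy h.symm)]
      have hstepA : pvStepA grid x (a1, a2) y
          = ((pvColorD grid).getD y []).foldl (fun dd ab =>
              if (pvQ grid x).1 ≤ ab.1 ∧ ab.1 ≤ (pvQ grid x).2.1 ∧
                 (pvQ grid x).2.2.1 ≤ ab.2 ∧ ab.2 ≤ (pvQ grid x).2.2.2 then
                (dd.1.modify y 0 (· + 1), dd.2.modify x [] (· ++ [y]))
              else dd) (a1, a2) := by
        unfold pvStepA; rw [if_pos hxy, hqA]
      obtain ⟨pA1, pA2⟩ := pvA_inner x y hxy (pvQ grid x) ((pvColorD grid).getD y []) a1 a2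
      have hcl : ((pvColorD grid).getD y []).countP (pvInBox (pvQ grid x))
          = (pvCL grid y).countP (pvInBox (pvQ grid x)) := by rw [pvColor_getD']
      by_cases hc0 : (pvCL grid y).countP (pvInBox (pvQ grid x)) = 0
      · have hB : pvStepB grid x (c1, c2) y = (c1, c2) := by
          unfold pvStepB
          rw [if_neg]
          rw [hcy, hc0]
          simp
        rw [hstepA, hB]
        apply ih
        · intro k; rw [pA1 k, hcl, hc0]; simpa using h1 k
        · intro k; rw [pA2 k, hcl, hc0]; simpa using h2 k
      · have hB : pvStepB grid x (c1, c2) y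
            = (c1.insert y (c1.getD y 0 + (((pvCL grid y).countP (pvInBox (pvQ grid x)) : Nat) : Int)),
               c2.modify x [] (· ++ List.replicate ((pvCL grid y).countP (pvInBox (pvQ grid x))) y)) := by
          unfold pvStepB
          rw [hcy]
          rw [if_pos (by exact_mod_cast hc0)]
          simp
        rw [hstepA, hB]
        apply ih
        · intro k; rw [pA1 k, hcl]
          by_cases hk : k = y
          · subst hk
            rw [PySem.Dict.getD_insert_self, if_pos rfl, h1 k]
          · rw [PySem.Dict.getD_insert_of_ne _ _ _ hk, if_neg hk]
            simpa using h1 k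
        · intro k; rw [pA2 k, hcl]
          unfold PySem.Dict.modify
          by_cases hk : k = x
          · subst hk
            rw [PySem.Dict.getD_insert_self, if_pos rfl, h2 k]
          · rw [PySem.Dict.getD_insert_of_ne _ _ _ hk, if_neg hk]
            simpa using h2 k

theorem pvXlock (grid : List (List Int)) :
    ∀ (xs : List Int), (∀ x ∈ xs, x ∈ (pvColorD grid).keys) →
    ∀ (a1 : PySem.Dict Int Int) (a2 : PySem.Dict Int (List Int))
      (c1 : PySem.Dict Int Int) (c2 : PySem.Dict Int (List Int)),
      (∀ k, a1.getD k 0 = c1.getD k 0) → (∀ k, a2.getD k [] = c2.getD k []) →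
      (∀ k, (xs.foldl (fun dd x => (pvColorD grid).keys.foldl (pvStepA grid x) dd) (a1, a2)).1.getD k 0
          = (xs.foldl (fun io x => (pvColorD grid).keys.foldl (pvStepB grid x) io) (c1, c2)).1.getD k 0) ∧
      (∀ k, (xs.foldl (fun dd x => (pvColorD grid).keys.foldl (pvStepA grid x) dd) (a1, a2)).2.getD k []
          = (xs.foldl (fun io x => (pvColorD grid).keys.foldl (pvStepB grid x) io) (c1, c2)).2.getD k []) := by
  intro xs
  induction xs with
  | nil => intro _ a1 a2 c1 c2 h1 h2; exact ⟨h1, h2⟩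
  | cons x rest ih =>
    intro hxs a1 a2 c1 c2 h1 h2
    simp only [List.foldl_cons]
    obtain ⟨g1, g2⟩ := pvYlock grid x (hxs x List.mem_cons_self) (pvColorD grid).keys a1 a2 c1 c2 h1 h2
    have hsplitA : (pvColorD grid).keys.foldl (pvStepA grid x) (a1, a2)
        = (((pvColorD grid).keys.foldl (pvStepA grid x) (a1, a2)).1,
           ((pvColorD grid).keys.foldl (pvStepA grid x) (a1, a2)).2) := rfl
    have hsplitB : (pvColorD grid).keys.foldl (pvStepB grid x) (c1, c2)
        = (((pvColorD grid).keys.foldl (pvStepB grid x) (c1, c2)).1,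
           ((pvColorD grid).keys.foldl (pvStepB grid x) (c1, c2)).2) := rfl
    rw [hsplitA, hsplitB]
    exact ih (fun z hz => hxs z (List.mem_cons_of_mem x hz)) _ _ _ _ g1 g2

theorem pvPhase2 (grid : List (List Int)) :
    (∀ k, (pvDDA grid).1.getD k 0 = (pvIOB grid).1.getD k 0) ∧
    (∀ k, (pvDDA grid).2.getD k [] = (pvIOB grid).2.getD k []) := by
  rw [pvDDA_eq, pvIOB_eq, pvPos_keys, pvBox_keys']
  apply pvXlock grid (pvColorD grid).keys (fun x h => h)
  · intro k
    rw [PySem.Dict.getD_empty]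
    unfold pvInd0
    rw [pvBox_keys']
    exact (pvGetD_foldl_insert_const 0 (pvColorD grid).keys k).symm
  · intro k
    rw [PySem.Dict.getD_empty]
    unfold pvOut0
    rw [pvBox_keys']
    exact (pvGetD_foldl_insert_const [] (pvColorD grid).keys k).symm

theorem pvKeys_eq (grid : List (List Int)) : (pvBoxD grid).keys = (pvPosD grid).keys := by
  rw [pvBox_keys', ← pvPos_keys]

-- ---------- phase 3: the topological elimination loop ----------
theorem pvKahn_inner (l : List Int) :
    ∀ (d1 d2 : PySem.Dict Int Int) (nex : List Int),
      (∀ k, d1.getD k 0 = d2.getD k 0) →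
      (∀ k, (l.foldl (fun (st : PySem.Dict Int Int × List Int) j =>
          (st.1.modify j 0 (· - 1), if (st.1.modify j 0 (· - 1)).getD j 0 == 0 then st.2 ++ [j] else st.2)) (d1, nex)).1.getD k 0
        = (l.foldl (fun (st : PySem.Dict Int Int × List Int) j =>
          (st.1.insert j (st.1.getD j 0 - 1), if (st.1.insert j (st.1.getD j 0 - 1)).getD j 0 == 0 then st.2 ++ [j] else st.2)) (d2, nex)).1.getD k 0) ∧
      (l.foldl (fun (st : PySem.Dict Int Int × List Int) j =>
          (st.1.modify j 0 (· - 1), if (st.1.modify j 0 (· - 1)).getD j 0 == 0 then st.2 ++ [j] else st.2)) (d1, nex)).2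
        = (l.foldl (fun (st : PySem.Dict Int Int × List Int) j =>
          (st.1.insert j (st.1.getD j 0 - 1), if (st.1.insert j (st.1.getD j 0 - 1)).getD j 0 == 0 then st.2 ++ [j] else st.2)) (d2, nex)).2 := by
  induction l with
  | nil => intro d1 d2 nex h; exact ⟨h, rfl⟩
  | cons j rest ih =>
    intro d1 d2 nex h
    simp only [List.foldl_cons]
    have hview : ∀ k, (d1.modify j 0 (· - 1)).getD k 0 = (d2.insert j (d2.getD j 0 - 1)).getD k 0 := by
      intro k
      unfold PySem.Dict.modify
      by_cases hk : k = j
      · subst hk; rw [PySem.Dict.getD_insert_self, PySem.Dict.getD_insert_self, h]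
      · rw [PySem.Dict.getD_insert_of_ne _ _ _ hk, PySem.Dict.getD_insert_of_ne _ _ _ hk, h]
    have hif : ((d1.modify j 0 (· - 1)).getD j 0 == 0) = ((d2.insert j (d2.getD j 0 - 1)).getD j 0 == 0) := by
      rw [hview]
    rw [hif]
    exact ih _ _ _ hview

theorem pvKahn_istep (dctA dctB : PySem.Dict Int (List Int))
    (hd : ∀ k, dctA.getD k [] = dctB.getD k []) (stack : List Int) :
    ∀ (d1 d2 : PySem.Dict Int Int) (nex : List Int),
      (∀ k, d1.getD k 0 = d2.getD k 0) →
      (∀ k, (stack.foldl (fun st i =>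
          (dctA.getD i []).foldl (fun (st : PySem.Dict Int Int × List Int) j =>
            (st.1.modify j 0 (· - 1), if (st.1.modify j 0 (· - 1)).getD j 0 == 0 then st.2 ++ [j] else st.2)) st) (d1, nex)).1.getD k 0
        = (stack.foldl (fun st i =>
          (dctB.getD i []).foldl (fun (st : PySem.Dict Int Int × List Int) j =>
            (st.1.insert j (st.1.getD j 0 - 1), if (st.1.insert j (st.1.getD j 0 - 1)).getD j 0 == 0 then st.2 ++ [j] else st.2)) st) (d2, nex)).1.getD k 0) ∧
      (stack.foldl (fun st i =>
          (dctA.getD i []).foldl (fun (st : PySem.Dict Int Int × List Int) j =>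
            (st.1.modify j 0 (· - 1), if (st.1.modify j 0 (· - 1)).getD j 0 == 0 then st.2 ++ [j] else st.2)) st) (d1, nex)).2
        = (stack.foldl (fun st i =>
          (dctB.getD i []).foldl (fun (st : PySem.Dict Int Int × List Int) j =>
            (st.1.insert j (st.1.getD j 0 - 1), if (st.1.insert j (st.1.getD j 0 - 1)).getD j 0 == 0 then st.2 ++ [j] else st.2)) st) (d2, nex)).2 := by
  induction stack with
  | nil => intro d1 d2 nex h; exact ⟨h, rfl⟩
  | cons i rest ih =>
    intro d1 d2 nex h
    simp only [List.foldl_cons]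
    rw [hd i]
    obtain ⟨h1, h2⟩ := pvKahn_inner (dctB.getD i []) d1 d2 nex h
    have hfst : ((dctB.getD i []).foldl (fun (st : PySem.Dict Int Int × List Int) j =>
        (st.1.modify j 0 (· - 1), if (st.1.modify j 0 (· - 1)).getD j 0 == 0 then st.2 ++ [j] else st.2)) (d1, nex))
        = (((dctB.getD i []).foldl (fun (st : PySem.Dict Int Int × List Int) j =>
            (st.1.modify j 0 (· - 1), if (st.1.modify j 0 (· - 1)).getD j 0 == 0 then st.2 ++ [j] else st.2)) (d1, nex)).1,
           ((dctB.getD i []).foldl (fun (st : PySem.Dict Int Int × List Int) j =>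
            (st.1.insert j (st.1.getD j 0 - 1), if (st.1.insert j (st.1.getD j 0 - 1)).getD j 0 == 0 then st.2 ++ [j] else st.2)) (d2, nex)).2) := by
      rw [← h2]
    rw [hfst]
    exact ih _ _ _ h1

theorem pvKahn_views (dctA dctB : PySem.Dict Int (List Int))
    (hd : ∀ k, dctA.getD k [] = dctB.getD k []) :
    ∀ (fuel : Nat) (st : List Int) (degA degB : PySem.Dict Int Int),
      (∀ k, degA.getD k 0 = degB.getD k 0) →
      ∀ k, (pvKahnA dctA fuel st degA).getD k 0 = (pvKahnB dctB fuel st degB).getD k 0 := by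
  intro fuel
  induction fuel with
  | zero => intro st degA degB h k; simpa [pvKahnA, pvKahnB] using h k
  | succ f ih =>
    intro st degA degB h k
    cases st with
    | nil => simpa [pvKahnA, pvKahnB] using h k
    | cons i₀ rest =>
      simp only [pvKahnA, pvKahnB]
      obtain ⟨h1, h2⟩ := pvKahn_istep dctA dctB hd (i₀ :: rest) degA degB [] h
      rw [h2]
      exact ih _ _ _ h1 k

-- ===== VERDICT (by name: the statement is the Claim_ definition above) =====
theorem lc_1591_spec : Claim_equal_lc_1591 := by
  intro grid _ _
  unfold Spec_lc_1591
  rw [pvA_eq, pvB_eq, pvKeys_eq]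
  obtain ⟨hdeg, hdct⟩ := pvPhase2 grid
  have hst : (pvPosD grid).keys.filter (fun x => (pvDDA grid).1.getD x 0 == 0)
      = (pvPosD grid).keys.filter (fun c => (pvIOB grid).1.getD c 0 == 0) := by
    apply List.filter_congr
    intro x _; rw [hdeg]
  rw [hst]
  apply List.all_congr rfl
  intro x
  rw [pvKahn_views (pvDDA grid).2 (pvIOB grid).2 hdct _ _ _ _ hdeg]
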